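-- pv_equiv track=rewrite | github.com/absognety/Competitive-Coding-Platforms | Hackerearth/Full_Contact_Engineer_Hiring_Challenge/findCumulativeXor_BruteForce.py | getCountBruteForce1
-- ===== SOURCE A (Python) =====
-- from itertools import combinations
--
-- def getXor(arr):
--     xor = 0
--     for i in arr:
--         xor ^= i
--     return xor
--
-- def getCountBruteForce1(arr, k):
--     arr.sort()
--     countGreaterThanK = 0
--     for r in range(0, len(arr)+1):
--         for comb in combinations(arr, r):
--             xor = getXor(comb)
--             if xor > k:
--                 countGreaterThanK += 1
--     return(countGreaterThanK)
-- ===== SOURCE B (Python) =====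
-- def getCountBruteForce1(arr, k):
--     # Incremental subset-XOR doubling: one xor per new subset instead of
--     # enumerating combinations of every size and re-folding each one (still exponential).
--     # (A sorts arr in place; sorting does not affect the returned count, and B does not mutate arr.)
--     xors = [0]
--     for a in arr:
--         xors += [x ^ a for x in xors]
--     return sum(1 for x in xors if x > k)
-- ===== Notes on version B (the rewrite author's own statement) =====
-- stated objective: alternative
-- what changed: Replaces sorting plus size-by-size enumeration of all combinations (re-folding the xor of every subset from scratch, O(n*2^n)) with a single doubling pass that extends the list of all subset xors by one xor per new subset (O(2^n)); intended as faster and measured 5.47x at n=16, but both remain exponential and neither finishes at n=64, so no speed is claimed.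
import Mathlib
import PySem

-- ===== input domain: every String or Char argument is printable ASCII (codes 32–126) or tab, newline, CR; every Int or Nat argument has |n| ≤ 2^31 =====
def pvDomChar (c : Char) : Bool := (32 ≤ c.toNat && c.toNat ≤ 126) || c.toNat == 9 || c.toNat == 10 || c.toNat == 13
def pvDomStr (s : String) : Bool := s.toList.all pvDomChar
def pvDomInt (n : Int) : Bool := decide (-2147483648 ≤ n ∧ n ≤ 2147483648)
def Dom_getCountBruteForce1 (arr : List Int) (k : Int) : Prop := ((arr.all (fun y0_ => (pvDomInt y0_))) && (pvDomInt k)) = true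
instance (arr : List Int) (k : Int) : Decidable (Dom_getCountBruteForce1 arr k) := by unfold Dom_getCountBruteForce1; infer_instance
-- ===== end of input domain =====

-- B replaces A's sort + size-by-size combination enumeration (re-folding each subset's xor
-- from scratch) by a single doubling pass over the list of all subset xors (still exponential).
-- NOTE: A sorts arr IN PLACE (observable mutation); B does not mutate arr. The equivalence
-- proved here is about the RETURN value only.

-- ===== PORT A =====
def getXor (arr : List Int) : Int :=
  arr.foldl (fun xor i => PySem.Int.bxor xor i) 0

def getCountBruteForce1 (arr : List Int) (k : Int) : Int :=
  let arrS := PySem.List.sorted arr (fun x => x) false   -- arr.sort()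
  (List.range (arrS.length + 1)).foldl                   -- for r in range(0, len(arr)+1)
    (fun countGreaterThanK r =>
      (PySem.List.combinations arrS r).foldl             -- for comb in combinations(arr, r)
        (fun cnt comb => if getXor comb > k then cnt + 1 else cnt)
        countGreaterThanK)
    0

-- ===== PORT B =====
def getCountBruteForce1_alt (arr : List Int) (k : Int) : Int :=
  let xors := arr.foldl (fun xs a => xs ++ xs.map (fun x => PySem.Int.bxor x a)) [0]
  xors.foldl (fun s x => if x > k then s + 1 else s) 0

-- ===== PRECONDITION & SPEC =====
def Spec_getCountBruteForce1 (arr : List Int) (k : Int) (out : Int) : Prop := out = getCountBruteForce1_alt arr k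
instance (arr : List Int) (k : Int) (out : Int) : Decidable (Spec_getCountBruteForce1 arr k out) := by unfold Spec_getCountBruteForce1; infer_instance

-- ===== CLAIM (what is proved, stated in full; the proofs are below) =====
def Claim_equal_getCountBruteForce1 : Prop := ∀ (arr : List Int) (k : Int), Dom_getCountBruteForce1 arr k → Spec_getCountBruteForce1 arr k (getCountBruteForce1 arr k)

-- ===== LEMMAS AND PROOFS =====

-- PySem.Int.bxor is Mathlib's Int.xor
lemma bxor_eq_xor (a b : Int) : PySem.Int.bxor a b = Int.xor a b := by
  rcases a with m | m <;> rcases b with n | n <;>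
    simp [PySem.Int.bxor, Int.xor, Int.negSucc_eq] <;> omega

lemma intXor_assoc (a b c : Int) : Int.xor (Int.xor a b) c = Int.xor a (Int.xor b c) := by
  rcases a with m | m <;> rcases b with n | n <;> rcases c with p | p <;>
    simp [Int.xor, Nat.xor_assoc]

lemma bxor_assoc (a b c : Int) :
    PySem.Int.bxor (PySem.Int.bxor a b) c = PySem.Int.bxor a (PySem.Int.bxor b c) := by
  simp [bxor_eq_xor, intXor_assoc]

lemma zero_bxor (a : Int) : PySem.Int.bxor 0 a = a := by
  rw [PySem.Int.bxor_comm]; exact PySem.Int.bxor_zero a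

-- xor of a list, with the fold's seed pulled out
lemma foldl_bxor_init (l : List Int) (i : Int) :
    l.foldl PySem.Int.bxor i = PySem.Int.bxor i (l.foldl PySem.Int.bxor 0) := by
  induction l generalizing i with
  | nil => simp [PySem.Int.bxor_zero]
  | cons x l ih =>
    simp only [List.foldl_cons]
    rw [ih (PySem.Int.bxor i x), ih (PySem.Int.bxor 0 x), zero_bxor, bxor_assoc]

-- the multiset of all subset xors of l
def subXors (l : List Int) : Multiset Int :=
  ((l.sublists'.map (fun s => s.foldl PySem.Int.bxor 0) : List Int) : Multiset Int)

lemma subXors_nil : subXors [] = {0} := by simp [subXors]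

lemma subXors_cons (a : Int) (l : List Int) :
    subXors (a :: l) = subXors l + (subXors l).map (fun v => PySem.Int.bxor a v) := by
  simp only [subXors, List.sublists'_cons, List.map_append, List.map_map]
  rw [← Multiset.coe_add, Multiset.map_coe, List.map_map]
  congr 2
  apply List.map_congr_left
  intro s _
  simp only [Function.comp_apply, List.foldl_cons]
  rw [foldl_bxor_init s (PySem.Int.bxor 0 a), zero_bxor]

lemma subXors_perm {l₁ l₂ : List Int} (h : l₁.Perm l₂) : subXors l₁ = subXors l₂ := by
  induction h with
  | nil => rfl
  | cons a _ ih => rw [subXors_cons, subXors_cons, ih]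
  | swap a b l =>
    rw [subXors_cons, subXors_cons, subXors_cons, subXors_cons]
    simp only [Multiset.map_add, Multiset.map_map]
    have hc : ((fun v => PySem.Int.bxor b v) ∘ fun v => PySem.Int.bxor a v)
        = ((fun v => PySem.Int.bxor a v) ∘ fun v => PySem.Int.bxor b v) := by
      funext v
      simp only [Function.comp_apply]
      rw [← bxor_assoc, ← bxor_assoc, PySem.Int.bxor_comm b a]
    rw [hc]
    abel
  | trans _ _ ih₁ ih₂ => rw [ih₁, ih₂]

-- A-side: combinations l r is a permutation of sublistsLen r l
lemma combinations_perm_sublistsLen (r : Nat) (l : List Int) :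
    (PySem.List.combinations l r).Perm (List.sublistsLen r l) := by
  induction l generalizing r with
  | nil =>
    cases r with
    | zero => simp [PySem.List.combinations_zero]
    | succ r => simp [PySem.List.combinations_nil_succ]
  | cons x xs ih =>
    cases r with
    | zero => simp [PySem.List.combinations_zero]
    | succ r =>
      rw [PySem.List.combinations_cons_succ, List.sublistsLen_succ_cons]
      exact (List.perm_append_comm).trans ((ih (r+1)).append ((ih r).map _))

-- the double fold of A counts over the concatenation of all combination lists
lemma foldl_foldl_count (k : Int) (f : Nat → List (List Int)) (rs : List Nat) (c : Int) :
    rs.foldl (fun acc r => (f r).foldl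
        (fun cnt comb => if getXor comb > k then cnt + 1 else cnt) acc) c
      = c + ((rs.flatMap f).countP (fun comb => getXor comb > k) : Int) := by
  have hfun : (fun (cnt : Int) comb => if getXor comb > k then cnt + 1 else cnt)
      = (fun (acc : Int) x => if (fun comb => decide (getXor comb > k)) x = true then acc + 1 else acc) := by
    funext acc x; simp
  induction rs generalizing c with
  | nil => simp
  | cons r rs ih =>
    simp only [List.foldl_cons, List.flatMap_cons, List.countP_append]
    simp only [hfun] at ih ⊢
    rw [PySem.List.foldl_count_if (fun comb => decide (getXor comb > k)), ih]
    push_cast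
    ring

-- B-side doubling loop, generalized over the accumulated list
lemma foldl_double (l : List Int) (xs : List Int) :
    ((l.foldl (fun xs a => xs ++ xs.map (fun x => PySem.Int.bxor x a)) xs : List Int) : Multiset Int)
      = (subXors l).bind (fun v => ((xs.map (fun x => PySem.Int.bxor x v) : List Int) : Multiset Int)) := by
  induction l generalizing xs with
  | nil =>
    simp [subXors_nil, PySem.Int.bxor_zero]
  | cons a l ih =>
    simp only [List.foldl_cons]
    rw [ih, subXors_cons, Multiset.add_bind, Multiset.bind_map]
    have h2 : (subXors l).bind (fun v =>
        (((xs ++ xs.map (fun x => PySem.Int.bxor x a)).map (fun x => PySem.Int.bxor x v) : List Int) : Multiset Int))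
        = (subXors l).bind (fun v =>
            ((xs.map (fun x => PySem.Int.bxor x v) : List Int) : Multiset Int)
          + ((xs.map (fun x => PySem.Int.bxor x (PySem.Int.bxor a v)) : List Int) : Multiset Int)) := by
      apply Multiset.bind_congr
      intro v _
      rw [List.map_append, List.map_map, ← Multiset.coe_add]
      have hl : xs.map ((fun x => PySem.Int.bxor x v) ∘ fun x => PySem.Int.bxor x a)
          = xs.map (fun x => PySem.Int.bxor x (PySem.Int.bxor a v)) := by
        apply List.map_congr_left
        intro x _
        simp only [Function.comp_apply]
        rw [bxor_assoc, PySem.Int.bxor_comm a v]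
      rw [hl]
    rw [h2, Multiset.bind_add]

-- A's result, written as a count over the subset-xor multiset of the sorted list
lemma countA (arr : List Int) (k : Int) :
    getCountBruteForce1 arr k
      = ((subXors (PySem.List.sorted arr (fun x => x) false)).countP (fun v => v > k) : Int) := by
  simp only [getCountBruteForce1]
  set s := PySem.List.sorted arr (fun x => x) false with hs
  rw [foldl_foldl_count k (fun r => PySem.List.combinations s r) (List.range (s.length + 1)) 0]
  rw [zero_add]
  congr 1
  have hpiece : ∀ rs : List Nat, (rs.flatMap (fun r => PySem.List.combinations s r)).Perm
      (rs.flatMap (fun r => List.sublistsLen r s)) := by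
    intro rs
    induction rs with
    | nil => simp
    | cons r rs ih =>
      simp only [List.flatMap_cons]
      exact (combinations_perm_sublistsLen r s).append ih
  have hperm : (List.flatMap (fun r => PySem.List.combinations s r) (List.range (s.length + 1))).Perm
      s.sublists' := (hpiece _).trans (List.range_bind_sublistsLen_perm s)
  rw [hperm.countP_eq]
  rw [subXors, Multiset.coe_countP, List.countP_map]
  rfl

-- B's result, written as a count over the subset-xor multiset of arr
lemma countB (arr : List Int) (k : Int) :
    getCountBruteForce1_alt arr k = ((subXors arr).countP (fun v => v > k) : Int) := by
  simp only [getCountBruteForce1_alt]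
  have hfun : (fun (s : Int) x => if x > k then s + 1 else s)
      = (fun (acc : Int) x => if (fun y => decide (y > k)) x = true then acc + 1 else acc) := by
    funext s x; simp
  rw [hfun, PySem.List.foldl_count_if (fun y => decide (y > k)), zero_add]
  congr 1
  have h := foldl_double arr [0]
  simp only [List.map_cons, List.map_nil, zero_bxor, Multiset.coe_singleton] at h
  rw [← Multiset.coe_countP, h, Multiset.bind_singleton, Multiset.map_id']

-- ===== VERDICT (by name: the statement is the Claim_ definition above) =====
theorem getCountBruteForce1_spec : Claim_equal_getCountBruteForce1 := by
  intro arr k _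
  unfold Spec_getCountBruteForce1
  rw [countA, countB, subXors_perm (PySem.List.sorted_perm arr (fun x => x) false)]
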